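-- pv_equiv track=rewrite | github.com/BatuhanElitok/Freelance-1 | try_zone.py | find_interactions
-- ===== SOURCE A (Python) =====
-- def find_interactions(dialog_data):
--     """
--     Karakterler arasındaki etkileşimleri analiz eder.
--
--     Args:
--         dialog_data: parse_lotr_script tarafından üretilen veri
--
--     Returns:
--         interactions: Karakter etkileşimlerini içeren bir sözlük
--     """
--     interactions = {}
--
--     for i in range(1, len(dialog_data)):
--         prev_character = dialog_data[i-1]['character']
--         curr_character = dialog_data[i]['character']
--
--         if prev_character != curr_character:
--             if prev_character not in interactions:
--                 interactions[prev_character] = {}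
--
--             if curr_character not in interactions[prev_character]:
--                 interactions[prev_character][curr_character] = 0
--
--             interactions[prev_character][curr_character] += 1
--
--     return interactions
-- ===== SOURCE B (Python) =====
-- def find_interactions(dialog_data):
--     chars = [d['character'] for d in dialog_data]
--     pairs = [(p, c) for p, c in zip(chars, chars[1:]) if p != c]
--     firsts = list(dict.fromkeys(p for p, _ in pairs))
--     return {p: {c: pairs.count((p, c))
--                 for c in dict.fromkeys(c2 for p2, c2 in pairs if p2 == p)}
--             for p in firsts}
-- ===== Notes on version B (the rewrite author's own statement) =====
-- stated objective: idiomatic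
-- what changed: Replaces A's incremental in-place nested-dict build over an index loop with a flat pipeline: extract the character list, zip it with its tail into adjacent pairs, drop equal pairs, and build the nested table by comprehension over the deduplicated first components, counting each (prev, curr) pair.
-- outside the precondition, e.g. on find_interactions([{'x': 'y'}]): A returns {}, B raises KeyError
import Mathlib
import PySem

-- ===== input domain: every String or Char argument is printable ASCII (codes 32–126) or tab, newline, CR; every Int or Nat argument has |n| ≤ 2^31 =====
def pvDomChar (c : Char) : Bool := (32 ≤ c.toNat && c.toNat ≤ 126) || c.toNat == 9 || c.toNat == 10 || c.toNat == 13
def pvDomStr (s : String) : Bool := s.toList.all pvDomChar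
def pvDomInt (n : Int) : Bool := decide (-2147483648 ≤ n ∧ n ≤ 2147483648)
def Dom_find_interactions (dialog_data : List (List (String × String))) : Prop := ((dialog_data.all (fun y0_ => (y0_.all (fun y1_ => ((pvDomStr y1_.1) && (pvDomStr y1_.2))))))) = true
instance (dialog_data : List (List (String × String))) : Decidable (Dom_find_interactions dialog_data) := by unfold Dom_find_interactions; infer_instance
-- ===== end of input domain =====

-- B replaces A's single stateful nested-dict-building index loop by a flat pipeline:
-- extract the character list, zip it with its own tail into adjacent pairs, drop equal
-- pairs, then build the table by comprehension over the deduplicated first components,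
-- counting occurrences of each (prev, curr) pair.  Objective: idiomatic (not faster).

-- shared field accessor: entry['character'] (first match in the association list)
def pvCharacter (e : List (String × String)) : String :=
  (PySem.Dict.mk e).getD "character" ""

-- ===== PORT A =====
def find_interactions (dialog_data : List (List (String × String))) : List (String × List (String × Int)) :=
  let interactions :=
    (PySem.List.pyRange 1 (dialog_data.length : Int)).foldl (fun inter i =>
      let prev := pvCharacter (PySem.List.pyGetD dialog_data (i - 1) [])
      let curr := pvCharacter (PySem.List.pyGetD dialog_data i [])
      if prev ≠ curr then
        let inter1 := if inter.contains prev then inter else inter.insert prev (PySem.Dict.mk [])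
        let inner := inter1.getD prev (PySem.Dict.mk [])
        let inner1 := if inner.contains curr then inner else inner.insert curr 0
        inter1.insert prev (inner1.insert curr (inner1.getD curr 0 + 1))
      else inter) (PySem.Dict.mk [])
  interactions.items.map (fun kv => (kv.1, kv.2.items))

-- ===== PORT B =====
def find_interactions_alt (dialog_data : List (List (String × String))) : List (String × List (String × Int)) :=
  let chars := dialog_data.map pvCharacter
  let pairs := (chars.zip (PySem.List.slice chars (some 1))).filter (fun pr => pr.1 != pr.2)
  let firsts := PySem.List.dedup (pairs.map (fun pr => pr.1))
  firsts.map (fun p => (p,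
    (PySem.List.dedup ((pairs.filter (fun q => q.1 == p)).map (fun q => q.2))).map
      (fun c => (c, (PySem.List.count pairs (p, c) : Int)))))

-- ===== PRECONDITION & SPEC =====
-- Pre_ excludes inputs in which some entry lacks the 'character' key: A raises KeyError
-- on them whenever the list has ≥ 2 entries, and on shorter lists returns {} only
-- because the loop bounds skip the entries; B raises KeyError on all of them.
def Pre_find_interactions (dialog_data : List (List (String × String))) : Prop :=
  ∀ e ∈ dialog_data, (PySem.Dict.mk e).contains "character" = true
instance (dialog_data : List (List (String × String))) : Decidable (Pre_find_interactions dialog_data) := by unfold Pre_find_interactions; infer_instance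

def pvWitness_find_interactions : (List (List (String × String))) :=
  [[("character", "FRODO")], [("character", "SAM")], [("character", "FRODO")]]

def Spec_find_interactions (dialog_data : List (List (String × String))) (out : List (String × List (String × Int))) : Prop := out = find_interactions_alt dialog_data
instance (dialog_data : List (List (String × String))) (out : List (String × List (String × Int))) : Decidable (Spec_find_interactions dialog_data out) := by unfold Spec_find_interactions; infer_instance

-- ===== CLAIM (what is proved, stated in full; the proofs are below) =====
def Claim_equal_find_interactions : Prop := ∀ (dialog_data : List (List (String × String))), Dom_find_interactions dialog_data → Pre_find_interactions dialog_data → Spec_find_interactions dialog_data (find_interactions dialog_data)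

-- ===== LEMMAS AND PROOFS =====

def pvStep (d : PySem.Dict String (PySem.Dict String Int)) (pr : String × String) :
    PySem.Dict String (PySem.Dict String Int) :=
  d.insert pr.1 ((d.getD pr.1 (PySem.Dict.mk [])).insert pr.2
    ((d.getD pr.1 (PySem.Dict.mk [])).getD pr.2 0 + 1))

def pvInner (ps : List (String × String)) (p : String) : List (String × Int) :=
  (PySem.List.dedup ((ps.filter (fun q => q.1 == p)).map (fun q => q.2))).map
    (fun c => (c, (PySem.List.count ps (p, c) : Int)))

theorem pv_dedup_append {α : Type} [BEq α] [LawfulBEq α] (l : List α) (a : α) :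
    PySem.List.dedup (l ++ [a])
      = if a ∈ l then PySem.List.dedup l else PySem.List.dedup l ++ [a] := by
  rw [PySem.List.dedup_eq_ofList, PySem.List.dedup_eq_ofList, PySem.Set.ofList_eq_foldl,
    List.foldl_append, List.foldl_cons, List.foldl_nil, ← PySem.Set.ofList_eq_foldl]
  by_cases h : a ∈ l
  · rw [if_pos h, PySem.Set.add_of_mem (by rwa [PySem.Set.mem_ofList])]
  · rw [if_neg h, PySem.Set.add_of_not_mem (by rwa [PySem.Set.mem_ofList])]

theorem pv_nest_getD (ps : List (String × String)) (p : String) :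
    ((ps.foldl pvStep (PySem.Dict.mk [])).getD p (PySem.Dict.mk [])).items = pvInner ps p := by
  induction ps using List.reverseRecOn with
  | nil => rfl
  | append_singleton ps q ih =>
    obtain ⟨p0, c0⟩ := q
    rw [List.foldl_append, List.foldl_cons, List.foldl_nil]
    by_cases hp : p = p0
    · subst hp
      rw [pvStep, PySem.Dict.getD_insert_self]
      have hkeys : ((ps.foldl pvStep (PySem.Dict.mk [])).getD p (PySem.Dict.mk [])).keys
          = PySem.List.dedup ((ps.filter (fun q => q.1 == p)).map (fun q => q.2)) := by
        show (((ps.foldl pvStep (PySem.Dict.mk [])).getD p (PySem.Dict.mk [])).items).map Prod.fst = _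
        rw [ih, pvInner, List.map_map]
        simp [Function.comp_def]
      have hnd : ((ps.foldl pvStep (PySem.Dict.mk [])).getD p (PySem.Dict.mk [])).keys.Nodup := by
        rw [hkeys]; exact PySem.List.nodup_dedup _
      by_cases hc : c0 ∈ (ps.filter (fun q => q.1 == p)).map (fun q => q.2)
      · -- c0 seen before for this p
        have hcd : c0 ∈ PySem.List.dedup ((ps.filter (fun q => q.1 == p)).map (fun q => q.2)) := by
          rw [PySem.List.mem_dedup]; exact hc
        have hmemit : (c0, (PySem.List.count ps (p, c0) : Int))
            ∈ ((ps.foldl pvStep (PySem.Dict.mk [])).getD p (PySem.Dict.mk [])).items := by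
          rw [ih, pvInner]
          exact List.mem_map_of_mem hcd
        have hgd : ((ps.foldl pvStep (PySem.Dict.mk [])).getD p (PySem.Dict.mk [])).getD c0 0
            = (PySem.List.count ps (p, c0) : Int) :=
          PySem.Dict.getD_of_mem_items _ hmemit hnd 0
        have hcont : ((ps.foldl pvStep (PySem.Dict.mk [])).getD p (PySem.Dict.mk [])).contains c0 = true := by
          rw [PySem.Dict.contains_iff_mem_keys, hkeys]; exact hcd
        rw [PySem.Dict.items_insert_of_contains _ _ hcont, ih, pvInner, pvInner, List.map_map]
        rw [List.filter_append, List.map_append]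
        have hfq : List.filter (fun q => q.1 == p) [(p, c0)] = [(p, c0)] := by simp
        rw [hfq]
        have hded : PySem.List.dedup
            (((ps.filter (fun q => q.1 == p)).map (fun q => q.2)) ++ [(p, c0)].map (fun q => q.2))
            = PySem.List.dedup ((ps.filter (fun q => q.1 == p)).map (fun q => q.2)) := by
          simp only [List.map_cons, List.map_nil]
          rw [pv_dedup_append, if_pos hc]
        rw [hded]
        apply List.map_congr_left
        intro c hcm
        by_cases hcc : c = c0
        · subst hcc
          simp only [Function.comp_apply, beq_self_eq_true, if_pos, hgd]
          simp [PySem.List.count_eq, List.count_append]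
        · have hcc' : ¬((p, c0) = (p, c)) := by
            intro h
            exact hcc ((Prod.mk.injEq _ _ _ _ ▸ h : (p = p ∧ c0 = c)).2).symm
          simp only [Function.comp_apply]
          rw [if_neg (by simp only [beq_iff_eq]; exact hcc)]
          simp [PySem.List.count_eq, List.count_append, hcc']
      · -- c0 fresh for this p
        have hcnt0 : List.count (p, c0) ps = 0 := by
          rw [List.count_eq_zero]
          intro hmem
          exact hc (List.mem_map.mpr ⟨(p, c0), List.mem_filter.mpr ⟨hmem, by simp⟩, rfl⟩)
        have hcont : ((ps.foldl pvStep (PySem.Dict.mk [])).getD p (PySem.Dict.mk [])).contains c0 = false := by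
          rw [← Bool.not_eq_true, PySem.Dict.contains_iff_mem_keys, hkeys, PySem.List.mem_dedup]
          exact hc
        have hgd : ((ps.foldl pvStep (PySem.Dict.mk [])).getD p (PySem.Dict.mk [])).getD c0 0 = 0 :=
          PySem.Dict.getD_of_not_contains _ _ hcont
        rw [PySem.Dict.items_insert_of_not_contains _ _ hcont, ih, hgd, pvInner, pvInner]
        rw [List.filter_append, List.map_append]
        have hfq : List.filter (fun q => q.1 == p) [(p, c0)] = [(p, c0)] := by simp
        rw [hfq]
        simp only [List.map_cons, List.map_nil]
        rw [pv_dedup_append, if_neg hc, List.map_append]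
        congr 1
        · apply List.map_congr_left
          intro c hcm
          have hcc : ¬((p, c0) = (p, c)) := by
            rw [PySem.List.mem_dedup] at hcm
            intro h
            apply hc
            rw [((Prod.mk.injEq _ _ _ _ ▸ h : (p = p ∧ c0 = c)).2)]
            exact hcm
          simp [PySem.List.count_eq, List.count_append, hcc]
        · simp [PySem.List.count_eq, List.count_append, List.count_singleton, hcnt0]
    · -- p ≠ p0 : the step does not touch key p
      rw [pvStep, PySem.Dict.getD_insert_of_ne _ _ _ hp, ih, pvInner, pvInner]
      have hfq : List.filter (fun q => q.1 == p) [(p0, c0)] = [] := by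
        simp [Ne.symm, hp]
      rw [List.filter_append, hfq, List.append_nil]
      apply List.map_congr_left
      intro c hcm
      have hcc : ¬((p0, c0) = (p, c)) := by
        intro h
        exact hp ((Prod.mk.injEq _ _ _ _ ▸ h : (p0 = p ∧ c0 = c)).1).symm
      simp [PySem.List.count_eq, List.count_append, hcc]

theorem pv_stepA_eq (inter : PySem.Dict String (PySem.Dict String Int)) (p c : String) :
    (let inter1 := if inter.contains p then inter else inter.insert p (PySem.Dict.mk [])
     let inner := inter1.getD p (PySem.Dict.mk [])
     let inner1 := if inner.contains c then inner else inner.insert c 0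
     inter1.insert p (inner1.insert c (inner1.getD c 0 + 1))) = pvStep inter (p, c) := by
  simp only [pvStep]
  by_cases hp : inter.contains p = true
  · simp only [hp, if_true]
    by_cases hc : (inter.getD p (PySem.Dict.mk [])).contains c = true
    · simp only [hc, if_true]
    · simp only [Bool.not_eq_true] at hc
      simp only [hc, Bool.false_eq_true, if_false, PySem.Dict.getD_insert_self,
        PySem.Dict.insert_insert_self, PySem.Dict.getD_of_not_contains _ _ hc]
  · simp only [Bool.not_eq_true] at hp
    have hc : (PySem.Dict.mk ([] : List (String × Int))).contains c = false := rfl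
    simp only [hp, Bool.false_eq_true, if_false, PySem.Dict.getD_insert_self,
      PySem.Dict.getD_of_not_contains _ _ hp, hc,
      PySem.Dict.insert_insert_self]
    rfl

theorem pv_adj_append {α : Type} (ys : List α) (x : α) :
    (ys ++ [x]).zip ((ys ++ [x]).drop 1)
      = ys.zip (ys.drop 1) ++ (ys.getLast?.map (fun l => (l, x))).toList := by
  induction ys with
  | nil => rfl
  | cons a t ih =>
    cases t with
    | nil => rfl
    | cons b t' => simpa [List.zip_cons_cons] using ih
theorem pv_foldl_adjacent {α σ : Type} (xs : List α) (dflt : α) (f : σ → α → α → σ) (init : σ) :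
    (PySem.List.pyRange 1 (xs.length : Int)).foldl
      (fun s i => f s (PySem.List.pyGetD xs (i - 1) dflt) (PySem.List.pyGetD xs i dflt)) init
      = (xs.zip (xs.drop 1)).foldl (fun s pr => f s pr.1 pr.2) init := by
  induction xs using List.reverseRecOn with
  | nil => rfl
  | append_singleton ys x ih =>
    rcases eq_or_ne ys [] with rfl | hne
    · rfl
    · have hpos : 0 < ys.length := List.length_pos_of_ne_nil hne
      have hlen : (1 : Int) ≤ (ys.length : Int) := by exact_mod_cast hpos
      have hr : PySem.List.pyRange 1 (((ys ++ [x]).length : Nat) : Int)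
          = PySem.List.pyRange 1 (ys.length : Int) ++ [(ys.length : Int)] := by
        have : (((ys ++ [x]).length : Nat) : Int) = (ys.length : Int) + 1 := by
          simp [List.length_append]
        rw [this, PySem.List.pyRange_one_succ_right hlen]
      rw [hr, List.foldl_append]
      have hcong : (PySem.List.pyRange 1 (ys.length : Int)).foldl
          (fun s i => f s (PySem.List.pyGetD (ys ++ [x]) (i - 1) dflt)
            (PySem.List.pyGetD (ys ++ [x]) i dflt)) init
          = (PySem.List.pyRange 1 (ys.length : Int)).foldl
          (fun s i => f s (PySem.List.pyGetD ys (i - 1) dflt)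
            (PySem.List.pyGetD ys i dflt)) init := by
        apply PySem.List.foldl_congr_mem
        intro acc i hi
        rw [PySem.List.mem_pyRange_one] at hi
        have h1 : PySem.List.pyGetD (ys ++ [x]) i dflt = PySem.List.pyGetD ys i dflt := by
          rw [PySem.List.pyGetD_eq_getElem (ys ++ [x]) dflt (by omega)
              (by simp only [List.length_append, List.length_cons, List.length_nil]; push_cast; omega),
            PySem.List.pyGetD_eq_getElem ys dflt (by omega) (by omega),
            List.getElem_append_left]
        have h2 : PySem.List.pyGetD (ys ++ [x]) (i - 1) dflt
            = PySem.List.pyGetD ys (i - 1) dflt := by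
          rw [PySem.List.pyGetD_eq_getElem (ys ++ [x]) dflt (by omega)
              (by simp only [List.length_append, List.length_cons, List.length_nil]; push_cast; omega),
            PySem.List.pyGetD_eq_getElem ys dflt (by omega) (by omega),
            List.getElem_append_left]
        rw [h1, h2]
      rw [hcong, ih]
      have hx : PySem.List.pyGetD (ys ++ [x]) (ys.length : Int) dflt = x := by
        rw [PySem.List.pyGetD_eq_getElem (ys ++ [x]) dflt (by omega)
            (by simp only [List.length_append, List.length_cons, List.length_nil]; push_cast; omega)]
        simp
      have hlast : PySem.List.pyGetD (ys ++ [x]) ((ys.length : Int) - 1) dflt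
          = ys.getLast hne := by
        rw [PySem.List.pyGetD_eq_getElem (ys ++ [x]) dflt (by omega)
            (by simp only [List.length_append, List.length_cons, List.length_nil]; push_cast; omega)]
        rw [List.getElem_append_left (by omega)]
        rw [List.getLast_eq_getElem]
        congr 1
        omega
      simp only [List.foldl_cons, List.foldl_nil]
      rw [hx, hlast, pv_adj_append ys x, List.foldl_append,
        List.getLast?_eq_some_getLast hne]
      rfl

theorem pv_nest_keys (ps : List (String × String)) :
    (ps.foldl pvStep (PySem.Dict.mk [])).keys
      = PySem.List.dedup (ps.map (fun pr => pr.1)) := by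
  have h2 : PySem.Set.update ((PySem.Dict.mk ([] : List (String × PySem.Dict String Int))).keys)
      (ps.map (fun pr => pr.1)) = PySem.List.dedup (ps.map (fun pr => pr.1)) := by
    rw [PySem.List.dedup_eq_ofList, PySem.Set.ofList_eq_foldl]
    rfl
  rw [← h2]
  exact PySem.Dict.keys_foldl_insert_key ps (fun pr => pr.1)
    (fun d pr => ((d.getD pr.1 (PySem.Dict.mk [])).insert pr.2
      ((d.getD pr.1 (PySem.Dict.mk [])).getD pr.2 0 + 1))) (PySem.Dict.mk [])


theorem pv_main (ps : List (String × String)) :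
    (ps.foldl pvStep (PySem.Dict.mk [])).items.map (fun kv => (kv.1, kv.2.items))
      = (PySem.List.dedup (ps.map (fun pr => pr.1))).map (fun p => (p, pvInner ps p)) := by
  have hnd : (ps.foldl pvStep (PySem.Dict.mk [])).keys.Nodup := by
    rw [pv_nest_keys]; exact PySem.List.nodup_dedup _
  rw [PySem.Dict.items_eq_map_keys _ hnd (PySem.Dict.mk []), List.map_map, pv_nest_keys]
  apply List.map_congr_left
  intro p hp
  simp only [Function.comp_apply]
  rw [pv_nest_getD]

-- ===== VERDICT (by name: the statement is the Claim_ definition above) =====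
theorem find_interactions_spec : Claim_equal_find_interactions := by
  unfold Claim_equal_find_interactions
  intro dd _ _
  unfold Spec_find_interactions
  simp only [find_interactions, find_interactions_alt]
  simp only [pv_stepA_eq]
  rw [pv_foldl_adjacent dd []
    (fun s a b => if pvCharacter a ≠ pvCharacter b
      then pvStep s (pvCharacter a, pvCharacter b) else s) (PySem.Dict.mk [])]
  have hzip : (dd.map pvCharacter).zip (PySem.List.slice (dd.map pvCharacter) (some 1))
      = (dd.zip (dd.drop 1)).map (fun pr => (pvCharacter pr.1, pvCharacter pr.2)) := by
    rw [PySem.List.slice_from _ (by norm_num : (0:Int) ≤ 1)]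
    show (dd.map pvCharacter).zip ((dd.map pvCharacter).drop 1) = _
    rw [← List.map_drop, List.zip_map]
    rfl
  rw [show (fun (s : PySem.Dict String (PySem.Dict String Int)) (pr : List (String × String) × List (String × String)) =>
      if pvCharacter pr.1 ≠ pvCharacter pr.2
        then pvStep s (pvCharacter pr.1, pvCharacter pr.2) else s)
    = (fun s pr => (fun (t : PySem.Dict String (PySem.Dict String Int)) (q : String × String) =>
        if q.1 ≠ q.2 then pvStep t q else t) s ((fun pr => (pvCharacter pr.1, pvCharacter pr.2)) pr))
    from rfl]
  rw [← List.foldl_map (f := fun pr : List (String × String) × List (String × String) =>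
      (pvCharacter pr.1, pvCharacter pr.2))
    (g := fun (t : PySem.Dict String (PySem.Dict String Int)) (q : String × String) =>
      if q.1 ≠ q.2 then pvStep t q else t) (l := dd.zip (List.drop 1 dd))
    (init := PySem.Dict.mk []), ← hzip]
  rw [PySem.List.foldl_ite_eq_foldl_filter (fun (q : String × String) => q.1 ≠ q.2) pvStep]
  have hdec : (fun (q : String × String) => decide (q.1 ≠ q.2)) = (fun q => q.1 != q.2) := by
    funext q
    rw [Bool.eq_iff_iff]
    simp [bne_iff_ne]
  rw [hdec, pv_main]
  simp only [pvInner]
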